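-- pv_equiv track=rewrite | github.com/madshoffnielsen/AdventOfCode | 2018/Day12/index.py | part1
-- ===== SOURCE A (Python) =====
-- def get_next_state(current, rules, padding=4):
--     # Add padding to handle edge cases
--     state = '.' * padding + current + '.' * padding
--     new_state = ''
--     for i in range(2, len(state) - 2):
--         pattern = state[i-2:i+3]
--         new_state += rules.get(pattern, '.')
--     return new_state
--
-- def calculate_sum(state, first_pot):
--     return sum(i + first_pot for i, pot in enumerate(state) if pot == '#')
--
-- def part1(initial_state, rules, generations=20):
--     state = initial_state
--     first_pot = 0
--
--     for _ in range(generations):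
--         new_state = get_next_state(state, rules)
--         # Adjust first pot number based on padding
--         first_pot -= 2
--         # Trim leading/trailing dots
--         while new_state.startswith('.'):
--             new_state = new_state[1:]
--             first_pot += 1
--         while new_state.endswith('.'):
--             new_state = new_state[:-1]
--         state = new_state
--
--     return calculate_sum(state, first_pot)
-- ===== SOURCE B (Python) =====
-- def _step(state, rules):
--     # one generation: new (trimmed) state and the change of the first pot number
--     padded = '....' + state + '....'
--     grown = ''.join(rules.get(padded[i:i + 5], '.') for i in range(len(state) + 4))
--     led = grown.lstrip('.')
--     delta = -2 + (len(grown) - len(led))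
--     return led.rstrip('.'), delta
--
-- def _calc(state, first_pot):
--     return sum(i + first_pot for i, pot in enumerate(state) if pot == '#')
--
-- def part1(initial_state, rules, generations=20):
--     state, first_pot = initial_state, 0
--     seen = {}
--     hist = []
--     remaining = generations
--     while remaining > 0:
--         if state in seen:
--             j = seen[state]
--             period = len(hist) - j
--             drift = first_pot - hist[j][1]
--             skips, extra = divmod(remaining, period)
--             s2, f2 = hist[j + extra]
--             return _calc(s2, first_pot + skips * drift + (f2 - hist[j][1]))
--         seen[state] = len(hist)
--         hist.append((state, first_pot))
--         state, d = _step(state, rules)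
--         first_pot += d
--         remaining -= 1
--     return _calc(state, first_pot)
-- ===== Notes on version B (the rewrite author's own statement) =====
-- stated objective: faster
-- what changed: B memoises every trimmed state in a dict with a parallel history list and, when a state repeats, jumps over all remaining whole cycles at once (the first-pot drift per cycle is linear), instead of A's simulating every one of the `generations` steps; the per-generation step is also rebuilt with ''.join over a comprehension and lstrip/rstrip length arithmetic instead of A's string += loop and character-by-character while-trims.
import Mathlib
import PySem

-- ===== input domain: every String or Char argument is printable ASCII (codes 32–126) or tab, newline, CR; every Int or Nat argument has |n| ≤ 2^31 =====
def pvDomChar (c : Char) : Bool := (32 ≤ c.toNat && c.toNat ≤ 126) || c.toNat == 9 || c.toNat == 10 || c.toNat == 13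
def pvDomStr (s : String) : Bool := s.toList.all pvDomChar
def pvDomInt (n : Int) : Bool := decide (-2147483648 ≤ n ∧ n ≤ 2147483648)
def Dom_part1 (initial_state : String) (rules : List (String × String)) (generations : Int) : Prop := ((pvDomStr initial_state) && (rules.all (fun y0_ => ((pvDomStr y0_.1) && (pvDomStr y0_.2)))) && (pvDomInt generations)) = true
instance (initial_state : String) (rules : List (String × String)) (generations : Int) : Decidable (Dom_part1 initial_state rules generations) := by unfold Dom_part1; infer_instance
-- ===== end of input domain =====

-- B replaces A's generation-by-generation loop with state memoisation and a cycle jump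
-- (faster once a state repeats); the return value is proved equal on every input.

-- ===== PORT A =====

-- rules.get(pattern, '.') : first-match lookup in the association list (python dict keys are unique)
def pvGetRule (rl : List (List Char × List Char)) (pat : List Char) : List Char :=
  match rl.find? (fun p => p.1 == pat) with
  | some p => p.2
  | none => ['.']

-- get_next_state(current, rules, padding=4): string += in a for-loop over range(2, len(state)-2)
def pvGrowA (rl : List (List Char × List Char)) (current : List Char) : List Char :=
  let state := ['.', '.', '.', '.'] ++ current ++ ['.', '.', '.', '.']
  (PySem.List.pyRange 2 ((state.length : Int) - 2) 1).foldl
    (fun new_state i =>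
      new_state ++ pvGetRule rl (PySem.List.slice state (some (i - 2)) (some (i + 3)))) []

-- while new_state.startswith('.'): new_state = new_state[1:]; first_pot += 1
def pvTrimLeadA : List Char → Int → (List Char × Int)
  | c :: t, f => if c = '.' then pvTrimLeadA t (f + 1) else (c :: t, f)
  | [], f => ([], f)

-- while new_state.endswith('.'): new_state = new_state[:-1]   (endswith('.') = last char is '.')
def pvTrimTrailA (l : List Char) : List Char :=
  if h : l.getLast? = some '.' then pvTrimTrailA l.dropLast else l
termination_by l.length
decreasing_by
  have hne : l ≠ [] := by intro e; simp [e] at h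
  simpa [List.length_dropLast] using Nat.sub_lt (List.length_pos_iff.mpr hne) one_pos

-- one iteration of A's for-loop body
def pvBodyA (rl : List (List Char × List Char)) : (List Char × Int) → (List Char × Int)
  | (state, first_pot) =>
    let new := pvGrowA rl state
    let first_pot := first_pot - 2
    let p := pvTrimLeadA new first_pot
    (pvTrimTrailA p.1, p.2)

-- calculate_sum(state, first_pot)
def pvCalcSumA (state : List Char) (first_pot : Int) : Int :=
  (((PySem.List.enumerate state).filter (fun p => p.2 == '#')).map (fun p => p.1 + first_pot)).sum

def part1 (initial_state : String) (rules : List (String × String)) (generations : Int) : Int :=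
  let rl := rules.map (fun p => (p.1.toList, p.2.toList))
  let r := (PySem.List.pyRange 0 generations 1).foldl (fun st _ => pvBodyA rl st)
    (initial_state.toList, 0)
  pvCalcSumA r.1 r.2

-- ===== PORT B =====

-- ''.join(rules.get(padded[i:i+5], '.') for i in range(len(state) + 4))
def pvGrowB (rl : List (List Char × List Char)) (state : List Char) : List Char :=
  let padded := ['.', '.', '.', '.'] ++ state ++ ['.', '.', '.', '.']
  ((PySem.List.pyRange 0 ((state.length : Int) + 4) 1).map
    (fun i => pvGetRule rl (PySem.List.slice padded (some i) (some (i + 5))))).flatten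

-- s.lstrip('.') / s.rstrip('.')  (hand ports, exact: drop the maximal run of '.' at that end)
def pvLstripDots (l : List Char) : List Char := l.dropWhile (fun c => c == '.')
def pvRstripDots (l : List Char) : List Char := (l.reverse.dropWhile (fun c => c == '.')).reverse

-- _step(state, rules): next trimmed state and the first-pot delta
def pvStepB (rl : List (List Char × List Char)) (state : List Char) : (List Char × Int) :=
  let grown := pvGrowB rl state
  let led := pvLstripDots grown
  let delta := -2 + ((grown.length : Int) - (led.length : Int))
  (pvRstripDots led, delta)

-- _calc(state, first_pot)
def pvCalcSumB (state : List Char) (first_pot : Int) : Int :=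
  (((PySem.List.enumerate state).filter (fun p => p.2 == '#')).map (fun p => p.1 + first_pot)).sum

-- the while-loop: `remaining` counts down (ported as the Nat fuel), memo dict + history, cycle jump
def pvLoopB (rl : List (List Char × List Char)) :
    Nat → (List Char × Int) → PySem.Dict (List Char) Nat → List (List Char × Int) → Int
  | 0, sf, _, _ => pvCalcSumB sf.1 sf.2
  | Nat.succ m, (state, first_pot), seen, hist =>
    match PySem.Dict.get? seen state with
    | some j =>
      let period := hist.length - j
      let drift := first_pot - (hist.getD j ([], 0)).2
      let skips := (Nat.succ m) / period
      let extra := (Nat.succ m) % period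
      let p2 := hist.getD (j + extra) ([], 0)
      pvCalcSumB p2.1 (first_pot + (skips : Int) * drift + (p2.2 - (hist.getD j ([], 0)).2))
    | none =>
      let st := pvStepB rl state
      pvLoopB rl m (st.1, first_pot + st.2)
        (PySem.Dict.insert seen state hist.length) (hist ++ [(state, first_pot)])

def part1_alt (initial_state : String) (rules : List (String × String)) (generations : Int) : Int :=
  let rl := rules.map (fun p => (p.1.toList, p.2.toList))
  pvLoopB rl generations.toNat (initial_state.toList, 0) PySem.Dict.empty []

-- ===== PRECONDITION & SPEC =====
def Spec_part1 (initial_state : String) (rules : List (String × String)) (generations : Int) (out : Int) : Prop := out = part1_alt initial_state rules generations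
instance (initial_state : String) (rules : List (String × String)) (generations : Int) (out : Int) : Decidable (Spec_part1 initial_state rules generations out) := by unfold Spec_part1; infer_instance

-- ===== CLAIM (what is proved, stated in full; the proofs are below) =====
def Claim_equal_part1 : Prop := ∀ (initial_state : String) (rules : List (String × String)) (generations : Int), Dom_part1 initial_state rules generations → Spec_part1 initial_state rules generations (part1 initial_state rules generations)

-- ===== LEMMAS AND PROOFS =====

theorem pvGrow_eq (rl : List (List Char × List Char)) (s : List Char) :
    pvGrowB rl s = pvGrowA rl s := by
  unfold pvGrowA pvGrowB
  rw [PySem.List.foldl_append_eq_flatMap]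
  show (List.map _ _).flatten = _
  rw [List.flatten_eq_flatMap, List.nil_append]
  rw [PySem.List.pyRange_one 2 _, PySem.List.pyRange_one 0 _]
  have hA : ((((['.','.','.','.'] ++ s ++ ['.','.','.','.']).length : Int) - 2) - 2).toNat = s.length + 4 := by
    simp; omega
  have hB : (((s.length : Int) + 4) - 0).toNat = s.length + 4 := by omega
  rw [hA, hB]
  simp only [List.flatMap_map]
  refine congrFun (congrArg _ (funext fun k => ?_)) _
  norm_num
  ring_nf

theorem pvTrimLead_eq (l : List Char) (f : Int) :
    pvTrimLeadA l f = (pvLstripDots l, f + ((l.length : Int) - ((pvLstripDots l).length : Int))) := by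
  induction l generalizing f with
  | nil => simp [pvTrimLeadA, pvLstripDots]
  | cons c t ih =>
    by_cases hc : c = '.'
    · subst hc
      simp only [pvTrimLeadA, ih, pvLstripDots, List.dropWhile_cons]
      norm_num
      ring
    · simp [pvTrimLeadA, hc, pvLstripDots]

theorem pvTrimTrail_eq (l : List Char) : pvTrimTrailA l = pvRstripDots l := by
  induction l using pvTrimTrailA.induct with
  | case1 l h ih =>
    rw [pvTrimTrailA, dif_pos h, ih]
    have hne : l ≠ [] := by intro e; simp [e] at h
    have hrev : l.reverse = '.' :: l.dropLast.reverse := by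
      conv_lhs => rw [← List.dropLast_append_getLast hne]
      rw [List.getLast?_eq_some_getLast hne] at h
      simp only [Option.some.injEq] at h
      simp [h]
    simp [pvRstripDots, hrev]
  | case2 l h =>
    rw [pvTrimTrailA, dif_neg h]
    cases hr : l.reverse with
    | nil => simp [pvRstripDots, hr]; simpa using congrArg List.reverse hr
    | cons c t =>
      have hc : c ≠ '.' := by
        intro e
        have : l.getLast? = some c := by
          rw [List.getLast?_eq_head?_reverse, hr]; rfl
        exact h (e ▸ this)
      simp [pvRstripDots, hr, hc]
      simpa using congrArg List.reverse hr

theorem pvBody_eq (rl : List (List Char × List Char)) (s : List Char) (f : Int) :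
    pvBodyA rl (s, f) = ((pvStepB rl s).1, f + (pvStepB rl s).2) := by
  simp only [pvBodyA, pvStepB, pvGrow_eq, pvTrimLead_eq, pvTrimTrail_eq]
  refine Prod.ext rfl ?_
  simp
  ring

theorem pvBody_shift (rl : List (List Char × List Char)) (k : Nat) (s : List Char) (f c : Int) :
    (pvBodyA rl)^[k] (s, f + c)
      = (((pvBodyA rl)^[k] (s, f)).1, ((pvBodyA rl)^[k] (s, f)).2 + c) := by
  induction k generalizing s f with
  | zero => simp
  | succ m ih =>
    rw [Function.iterate_succ_apply, Function.iterate_succ_apply]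
    have h1 : pvBodyA rl (s, f + c) = ((pvBodyA rl (s, f)).1, (pvBodyA rl (s, f)).2 + c) := by
      rw [pvBody_eq, pvBody_eq]
      refine Prod.ext rfl ?_
      simp; ring
    rw [h1]
    have h2 := ih (pvBodyA rl (s, f)).1 (pvBodyA rl (s, f)).2
    simpa using h2

theorem pvBody_cycle (rl : List (List Char × List Char)) (p : Nat) (s : List Char) (φ ψ : Int)
    (h : (pvBodyA rl)^[p] (s, φ) = (s, ψ)) (q : Nat) :
    (pvBodyA rl)^[q * p] (s, φ) = (s, φ + (q : Int) * (ψ - φ)) := by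
  induction q with
  | zero => simp
  | succ m ih =>
    have hq : (m + 1) * p = p + m * p := by ring
    rw [hq, Function.iterate_add_apply, ih]
    rw [pvBody_shift rl p s φ ((m : Int) * (ψ - φ)), h]
    refine Prod.ext rfl ?_
    push_cast
    ring

theorem pvFoldl_const_iterate {α β : Type} (h : α → α) (l : List β) (init : α) :
    l.foldl (fun st _ => h st) init = h^[l.length] init := by
  induction l generalizing init with
  | nil => rfl
  | cons x t ih => simp [List.foldl_cons, ih, Function.iterate_succ_apply]

theorem pvGetDAppendLt (L : List (List Char × Int)) (x : List Char × Int) (n : Nat)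
    (hn : n < L.length) : (L ++ [x]).getD n ([], 0) = L.getD n ([], 0) := by
  rw [List.getD, List.getElem?_append_left hn]; rfl

theorem pvGetDAppendEnd (L : List (List Char × Int)) (x : List Char × Int) :
    (L ++ [x]).getD L.length ([], 0) = x := by
  rw [List.getD, List.getElem?_append_right (le_refl _)]; simp

theorem pvLoopB_eq (rl : List (List Char × List Char)) (fuel : Nat)
    (hist : List (List Char × Int)) (s : List Char) (f : Int)
    (seen : PySem.Dict (List Char) Nat)
    (Hchain : ∀ i : Nat, i + 1 < (hist ++ [(s, f)]).length →
      (hist ++ [(s, f)]).getD (i + 1) ([], 0) = pvBodyA rl ((hist ++ [(s, f)]).getD i ([], 0)))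
    (Hseen : ∀ k j, PySem.Dict.get? seen k = some j →
      j < hist.length ∧ (hist.getD j ([], 0)).1 = k) :
    pvLoopB rl fuel (s, f) seen hist
      = pvCalcSumB ((pvBodyA rl)^[fuel] (s, f)).1 ((pvBodyA rl)^[fuel] (s, f)).2 := by
  induction fuel generalizing s f seen hist with
  | zero => simp [pvLoopB]
  | succ m ih =>
    cases hget : PySem.Dict.get? seen s with
    | none =>
      rw [pvLoopB, hget]
      have hstep : ((pvStepB rl s).1, f + (pvStepB rl s).2) = pvBodyA rl (s, f) :=
        (pvBody_eq rl s f).symm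
      have hch : ∀ i : Nat, i + 1 < ((hist ++ [(s, f)]) ++ [((pvStepB rl s).1, f + (pvStepB rl s).2)]).length →
          ((hist ++ [(s, f)]) ++ [((pvStepB rl s).1, f + (pvStepB rl s).2)]).getD (i + 1) ([], 0)
            = pvBodyA rl (((hist ++ [(s, f)]) ++ [((pvStepB rl s).1, f + (pvStepB rl s).2)]).getD i ([], 0)) := by
        intro i hi
        simp only [List.length_append, List.length_cons, List.length_nil] at hi
        by_cases hlt : i + 1 < (hist ++ [(s, f)]).length
        · rw [pvGetDAppendLt (hist ++ [(s, f)]) _ (i + 1) hlt,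
              pvGetDAppendLt (hist ++ [(s, f)]) _ i (Nat.lt_of_succ_lt hlt)]
          exact Hchain i hlt
        · have hie : i = hist.length := by simp at hlt; omega
          rw [hie]
        -- last link: the appended element is exactly one step from the previous last
          have e1 : ((hist ++ [(s, f)]) ++ [((pvStepB rl s).1, f + (pvStepB rl s).2)]).getD
              (hist.length + 1) ([], 0) = ((pvStepB rl s).1, f + (pvStepB rl s).2) := by
            have := pvGetDAppendEnd (hist ++ [(s, f)]) ((pvStepB rl s).1, f + (pvStepB rl s).2)
            simpa using this
          have e2 : ((hist ++ [(s, f)]) ++ [((pvStepB rl s).1, f + (pvStepB rl s).2)]).getD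
              hist.length ([], 0) = (s, f) := by
            rw [pvGetDAppendLt (hist ++ [(s, f)]) _ hist.length (by simp)]
            exact pvGetDAppendEnd hist (s, f)
          rw [e1, e2]
          exact hstep
      have hsn : ∀ k j, PySem.Dict.get? (PySem.Dict.insert seen s hist.length) k = some j →
          j < (hist ++ [(s, f)]).length ∧ ((hist ++ [(s, f)]).getD j ([], 0)).1 = k := by
        intro k j hj
        rw [PySem.Dict.get?_insert] at hj
        by_cases hk : k = s
        · rw [if_pos hk] at hj
          have hje : j = hist.length := by simpa using hj.symm
          refine ⟨by simp [hje], ?_⟩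
          rw [hje, pvGetDAppendEnd hist (s, f), hk]
        · rw [if_neg hk] at hj
          obtain ⟨h1, h2⟩ := Hseen k j hj
          refine ⟨by simp; omega, ?_⟩
          rw [pvGetDAppendLt hist (s, f) j h1, h2]
      rw [ih _ _ _ _ hch hsn, hstep, ← Function.iterate_succ_apply]
    | some j =>
      rw [pvLoopB, hget]
      obtain ⟨hjlt, hj1⟩ := Hseen s j hget
      have chainIter : ∀ i : Nat, j + i < (hist ++ [(s, f)]).length →
          (hist ++ [(s, f)]).getD (j + i) ([], 0)
            = (pvBodyA rl)^[i] ((hist ++ [(s, f)]).getD j ([], 0)) := by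
        intro i
        induction i with
        | zero => intro _; simp
        | succ n ihn =>
          intro hlt
          rw [show j + (n + 1) = (j + n) + 1 from rfl,
              Hchain (j + n) (by omega), ihn (by omega)]
          exact (Function.iterate_succ_apply' _ _ _).symm
      have hφ : (hist ++ [(s, f)]).getD j ([], 0) = (s, (hist.getD j ([], 0)).2) := by
        have he : (hist ++ [(s, f)]).getD j ([], 0) = hist.getD j ([], 0) := by
          rw [List.getD, List.getElem?_append_left hjlt]; rfl
        rw [he, ← hj1]
      have hend : (hist ++ [(s, f)]).getD hist.length ([], 0) = (s, f) :=
        pvGetDAppendEnd hist (s, f)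
      have hp : 0 < hist.length - j := by omega
      have hcyc : (pvBodyA rl)^[hist.length - j] (s, (hist.getD j ([], 0)).2) = (s, f) := by
        have h := chainIter (hist.length - j) (by simp; omega)
        rw [show j + (hist.length - j) = hist.length from by omega, hend, hφ] at h
        exact h.symm
      have hrlt : (m + 1) % (hist.length - j) < hist.length - j := Nat.mod_lt _ hp
      have hqr : (pvBodyA rl)^[m + 1] (s, (hist.getD j ([], 0)).2)
          = ((hist.getD (j + (m + 1) % (hist.length - j)) ([], 0)).1,
             (hist.getD (j + (m + 1) % (hist.length - j)) ([], 0)).2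
               + (((m + 1) / (hist.length - j) : Nat) : Int) * (f - (hist.getD j ([], 0)).2)) := by
        have hsplit : m + 1 = (m + 1) % (hist.length - j)
            + ((m + 1) / (hist.length - j)) * (hist.length - j) := (Nat.mod_add_div' _ _).symm
        have hmid : (hist ++ [(s, f)]).getD (j + (m + 1) % (hist.length - j)) ([], 0)
            = hist.getD (j + (m + 1) % (hist.length - j)) ([], 0) := by
          rw [List.getD, List.getElem?_append_left (by omega)]; rfl
        have hchain := chainIter ((m + 1) % (hist.length - j)) (by simp; omega)
        rw [hφ, hmid] at hchain
        conv_lhs => rw [hsplit]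
        rw [Function.iterate_add_apply,
            pvBody_cycle rl (hist.length - j) s (hist.getD j ([], 0)).2 f hcyc,
            pvBody_shift rl _ s _ _, ← hchain]
      have hfin := pvBody_shift rl (m + 1) s (hist.getD j ([], 0)).2 (f - (hist.getD j ([], 0)).2)
      rw [show (hist.getD j ([], 0)).2 + (f - (hist.getD j ([], 0)).2) = f from by ring] at hfin
      rw [hfin, hqr]
      simp only [Nat.succ_eq_add_one]
      exact congrArg _ (by push_cast; ring)

-- ===== VERDICT (by name: the statement is the Claim_ definition above) =====
theorem part1_spec : Claim_equal_part1 := by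
  intro initial_state rules generations _
  unfold Spec_part1 part1 part1_alt
  dsimp only []
  rw [pvLoopB_eq _ _ _ _ _ _ (by intro i hi; simp at hi) (by intro k j hj; simp [PySem.Dict.get?_empty] at hj)]
  rw [pvFoldl_const_iterate]
  simp [PySem.List.length_pyRange_one, pvCalcSumA, pvCalcSumB]
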